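-- pv_equiv track=rewrite | github.com/wahhajjaved/large_language_maniacs | downloaded_data/ctssb/training/fitz_66a072c2a9686b4918c711395e98b32997a6e1dd_after.py | chooseNEnumerate
-- ===== SOURCE A (Python) =====
-- def chooseNEnumerate(objs, number=1):
--     """Iterator over all posibilities of choosing `number` of `objs`
--
--     This *exhaustively lists* all options, not providing overall
--     statistics.
--     """
--     # by Richard Darst
--     if number == 0:
--         yield ()
--         return
--
--     for i, obj in enumerate(objs):
--         otherobjs = objs[:i] + objs[i+1:]
--         #print " current", obj, otherobjs
--         for conditional_selections in chooseNEnumerate(otherobjs, number-1):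
--             #print " others", conditional_selections
--             yield ( obj, ) + conditional_selections
-- ===== SOURCE B (Python) =====
-- def chooseNEnumerate(objs, number=1):
--     """Iterator over all posibilities of choosing `number` of `objs`.
--
--     Breadth-first re-implementation: expand partial selections level by
--     level, `number` times, then yield the finished prefixes.  Choosing a
--     negative count yields nothing.
--     """
--     if number < 0:
--         return
--     partials = [((), objs)]
--     for _ in range(number):
--         if not partials:
--             break
--         nxt = []
--         for prefix, rest in partials:
--             for i, obj in enumerate(rest):
--                 nxt.append((prefix + (obj,), rest[:i] + rest[i+1:]))
--         partials = nxt
--     for prefix, _ in partials: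
--         yield prefix
-- ===== Notes on version B (the rewrite author's own statement) =====
-- stated objective: alternative
-- what changed: Replaced the nested-generator recursion (recurse per chosen element) by an iterative breadth-first level expansion: a list of (prefix, remaining) partial states is expanded `number` times, then the finished prefixes are yielded; same output order, no recursion.
import Mathlib
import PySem

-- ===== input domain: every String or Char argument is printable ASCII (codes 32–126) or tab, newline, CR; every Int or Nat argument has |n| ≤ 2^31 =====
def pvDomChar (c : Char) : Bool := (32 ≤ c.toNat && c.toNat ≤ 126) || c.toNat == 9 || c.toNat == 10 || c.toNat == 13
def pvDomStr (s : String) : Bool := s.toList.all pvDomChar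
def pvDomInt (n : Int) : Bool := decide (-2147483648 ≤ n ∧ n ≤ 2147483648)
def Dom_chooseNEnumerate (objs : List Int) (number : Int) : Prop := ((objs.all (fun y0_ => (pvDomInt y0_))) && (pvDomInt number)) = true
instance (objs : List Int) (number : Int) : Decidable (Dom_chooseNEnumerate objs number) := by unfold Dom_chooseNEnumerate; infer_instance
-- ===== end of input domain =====

-- B replaces A's per-element recursion by an iterative breadth-first expansion of
-- (prefix, remaining) states; same values in the same order (alternative decomposition).

-- ===== PORT A =====
-- recursive generator: yield () when number == 0, else for each i recurse on objs[:i] + objs[i+1:]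
def chooseNEnumerate (objs : List Int) (number : Int) : List (List Int) :=
  if number = 0 then [[]]
  else
    (PySem.List.enumerate objs).attach.flatMap (fun q =>
      -- otherobjs = objs[:i] + objs[i+1:]
      (chooseNEnumerate (PySem.List.slice objs none (some q.1.1) ++
                         PySem.List.slice objs (some (q.1.1 + 1)) none) (number - 1)).map
        (fun t => q.1.2 :: t))
termination_by objs.length
decreasing_by
  rcases (PySem.List.mem_enumerate_iff _ _ _).mp q.2 with ⟨k, hk, hq⟩
  have h1 : q.1.1 = (k : Int) := by rw [hq]; simp
  rw [h1, show ((k : Int) + 1) = ((k + 1 : Nat) : Int) by push_cast; ring]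
  rw [PySem.List.slice_to_natCast, PySem.List.slice_from_natCast]
  rw [List.length_append, List.length_take, List.length_drop]
  omega

-- ===== PORT B =====
-- one level of expansion: each (prefix, rest) state spawns (prefix+(obj,), rest[:i]+rest[i+1:])
def altStep (partials : List (List Int × List Int)) : List (List Int × List Int) :=
  partials.flatMap (fun pr =>
    (PySem.List.enumerate pr.2).map (fun q =>
      (pr.1 ++ [q.2],
       PySem.List.slice pr.2 none (some q.1) ++ PySem.List.slice pr.2 (some (q.1 + 1)) none)))

-- the `for _ in range(number)` loop, stopping early once no partial states remain
def altLoop : Nat → List (List Int × List Int) → List (List Int × List Int)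
  | 0, ps => ps
  | n + 1, ps => if ps = [] then ps else altLoop n (altStep ps)

def chooseNEnumerate_alt (objs : List Int) (number : Int) : List (List Int) :=
  if number < 0 then []
  else (altLoop number.toNat [([], objs)]).map Prod.fst

-- ===== PRECONDITION & SPEC =====
def Spec_chooseNEnumerate (objs : List Int) (number : Int) (out : List (List Int)) : Prop := out = chooseNEnumerate_alt objs number
instance (objs : List Int) (number : Int) (out : List (List Int)) : Decidable (Spec_chooseNEnumerate objs number out) := by unfold Spec_chooseNEnumerate; infer_instance

-- ===== CLAIM (what is proved, stated in full; the proofs are below) =====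
def Claim_equal_chooseNEnumerate : Prop := ∀ (objs : List Int) (number : Int), Dom_chooseNEnumerate objs number → Spec_chooseNEnumerate objs number (chooseNEnumerate objs number)

-- ===== LEMMAS AND PROOFS =====

-- A yields nothing for negative number: the recursion exhausts objs without reaching 0
theorem chooseNEnumerate_neg_aux (L : Nat) : ∀ (objs : List Int), objs.length ≤ L →
    ∀ (number : Int), number < 0 → chooseNEnumerate objs number = [] := by
  induction L with
  | zero =>
    intro objs hL number h
    have hobjs : objs = [] := by cases objs <;> simp_all
    subst hobjs
    rw [chooseNEnumerate, if_neg (by omega)]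
    simp [PySem.List.enumerate_nil]
  | succ L ih =>
    intro objs hL number h
    rw [chooseNEnumerate, if_neg (by omega)]
    rw [List.flatMap_eq_nil_iff]
    intro q _
    rcases (PySem.List.mem_enumerate_iff _ _ _).mp q.2 with ⟨k, hk, hq⟩
    have h1 : q.1.1 = (k : Int) := by rw [hq]; simp
    rw [ih _ (by
      rw [h1, show ((k : Int) + 1) = ((k + 1 : Nat) : Int) by push_cast; ring]
      rw [PySem.List.slice_to_natCast, PySem.List.slice_from_natCast]
      rw [List.length_append, List.length_take, List.length_drop]
      omega) _ (by omega)]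
    simp

theorem chooseNEnumerate_neg (objs : List Int) (number : Int) (h : number < 0) :
    chooseNEnumerate objs number = [] :=
  chooseNEnumerate_neg_aux objs.length objs le_rfl number h

-- key invariant: A applied to every pending partial state = B's remaining loop
theorem chooseNEnumerate_key (n : Nat) (partials : List (List Int × List Int)) :
    partials.flatMap (fun pr => (chooseNEnumerate pr.2 (n : Int)).map (fun t => pr.1 ++ t)) =
      (altLoop n partials).map Prod.fst := by
  induction n generalizing partials with
  | zero =>
    rw [altLoop]
    have h0 : ∀ pr : List Int × List Int,
        (chooseNEnumerate pr.2 ((0 : Nat) : Int)).map (fun t => pr.1 ++ t) = [pr.1] := by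
      intro pr
      rw [show ((0 : Nat) : Int) = 0 by norm_num, chooseNEnumerate, if_pos rfl]
      simp
    simp only [h0]
    exact List.map_eq_flatMap.symm
  | succ n ih =>
    by_cases hps : partials = []
    · subst hps; simp [altLoop]
    rw [altLoop, if_neg hps, ← ih (altStep partials), altStep, List.flatMap_assoc]
    congr 1
    funext pr
    rw [show ((n + 1 : Nat) : Int) = (n : Int) + 1 by push_cast; ring,
        chooseNEnumerate, if_neg (by omega)]
    simp only [List.map_flatMap, List.flatMap_subtype, List.unattach_attach, List.flatMap_map,
      List.map_map, add_sub_cancel_right]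
    congr 1
    funext q
    congr 1
    funext t
    show pr.1 ++ (q.2 :: t) = (pr.1 ++ [q.2]) ++ t
    rw [List.append_cons]

-- ===== VERDICT (by name: the statement is the Claim_ definition above) =====
theorem chooseNEnumerate_spec : Claim_equal_chooseNEnumerate := by
  intro objs number _
  unfold Spec_chooseNEnumerate chooseNEnumerate_alt
  by_cases hn : number < 0
  · rw [if_pos hn, chooseNEnumerate_neg objs number hn]
  · rw [if_neg hn]
    have hcast : ((number.toNat : Nat) : Int) = number := Int.toNat_of_nonneg (by omega)
    have h := chooseNEnumerate_key number.toNat [([], objs)]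
    rw [hcast] at h
    simpa using h
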